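-- pv_equiv track=rewrite | github.com/dariakriukova/Advent_of_Code_2024 | day_9/daria_solution_2.py | find_leftmost_free_space
-- ===== SOURCE A (Python) =====
-- def find_leftmost_free_space(disk, file_length):
--     consecutive = 0
--     start_pos = 0
--     for idx, block in enumerate(disk):
--         if block == '.':
--             if consecutive == 0:
--                 start_pos = idx
--             consecutive += 1
--             if consecutive == file_length:
--                 return start_pos
--         else:
--             consecutive = 0
--     return None
-- ===== SOURCE B (Python) =====
-- def find_leftmost_free_space(disk, file_length):
--     # Two-pointer run-grouping scan: jump over each maximal run of equal
--     # blocks at once; return the run's start when it is a long-enough free run.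
--     n = len(disk)
--     i = 0
--     while i < n:
--         j = i
--         while j < n and disk[j] == disk[i]:
--             j += 1
--         if disk[i] == '.' and 0 < file_length <= j - i:
--             return i
--         i = j
--     return None
-- ===== Notes on version B (the rewrite author's own statement) =====
-- stated objective: alternative
-- what changed: Replaces the per-element consecutive counter with start tracking by a two-pointer run-grouping scan that jumps over each maximal run of equal blocks and returns the run start when a free run is long enough.
import Mathlib
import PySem

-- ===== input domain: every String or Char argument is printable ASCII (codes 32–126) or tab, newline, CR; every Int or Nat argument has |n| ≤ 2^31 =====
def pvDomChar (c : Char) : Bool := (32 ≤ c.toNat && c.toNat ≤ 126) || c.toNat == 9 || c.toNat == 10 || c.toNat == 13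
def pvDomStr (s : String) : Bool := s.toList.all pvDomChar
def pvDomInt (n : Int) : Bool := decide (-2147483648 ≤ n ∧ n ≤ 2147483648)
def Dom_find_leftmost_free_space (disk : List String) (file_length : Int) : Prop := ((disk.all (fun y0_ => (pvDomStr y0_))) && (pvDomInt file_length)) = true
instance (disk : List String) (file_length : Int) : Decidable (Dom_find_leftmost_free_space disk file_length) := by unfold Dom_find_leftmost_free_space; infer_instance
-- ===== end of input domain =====

-- B replaces A's per-element consecutive counter with start tracking by a two-pointer
-- run-grouping scan over maximal runs of equal blocks (alternative decomposition, same cost).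

-- ===== PORT A =====
-- A's for-loop over enumerate(disk) with state (consecutive, start_pos) and early return.
def goA (file_length : Int) : List String → Int → Int → Int → Option Int
  | [], _, _, _ => none
  | block :: rest, idx, consecutive, start_pos =>
    if block = "." then
      let start' := if consecutive = 0 then idx else start_pos
      if consecutive + 1 = file_length then some start'
      else goA file_length rest (idx + 1) (consecutive + 1) start'
    else goA file_length rest (idx + 1) 0 start_pos

def find_leftmost_free_space (disk : List String) (file_length : Int) : Option Int :=
  goA file_length disk 0 0 0

-- ===== PORT B =====
-- length of the run of elements equal to x at the front of the list (B's inner `while j` scan)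
def runLen (x : String) : List String → Nat
  | [] => 0
  | y :: ys => if y = x then runLen x ys + 1 else 0

-- B's outer `while i < n` loop: i is the running index of the current run's start.
def goB (file_length : Int) : List String → Int → Option Int
  | [], _ => none
  | x :: xs, i =>
    let k := runLen x xs
    if x = "." ∧ 0 < file_length ∧ file_length ≤ (k : Int) + 1 then some i
    else goB file_length (xs.drop k) (i + (k : Int) + 1)
termination_by l _ => l.length
decreasing_by simp only [List.length_drop, List.length_cons]; omega

def find_leftmost_free_space_alt (disk : List String) (file_length : Int) : Option Int :=
  goB file_length disk 0

-- ===== PRECONDITION & SPEC =====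
def Spec_find_leftmost_free_space (disk : List String) (file_length : Int) (out : Option Int) : Prop := out = find_leftmost_free_space_alt disk file_length
instance (disk : List String) (file_length : Int) (out : Option Int) : Decidable (Spec_find_leftmost_free_space disk file_length out) := by unfold Spec_find_leftmost_free_space; infer_instance

-- ===== CLAIM (what is proved, stated in full; the proofs are below) =====
def Claim_equal_find_leftmost_free_space : Prop := ∀ (disk : List String) (file_length : Int), Dom_find_leftmost_free_space disk file_length → Spec_find_leftmost_free_space disk file_length (find_leftmost_free_space disk file_length)

-- ===== LEMMAS AND PROOFS =====

-- A's loop over a run of j dots entered with consecutive = c ≥ 1 and start_pos = st: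
-- it returns st iff file_length falls inside (c, c + j], else exits with consecutive = c + j.
theorem goA_dotrun (fl : Int) : ∀ (j : Nat) (rest : List String) (i c st : Int), 1 ≤ c →
    goA fl (List.replicate j "." ++ rest) i c st =
      if c < fl ∧ fl ≤ c + (j : Int) then some st
      else goA fl rest (i + (j : Int)) (c + (j : Int)) st := by
  intro j
  induction j with
  | zero =>
    intro rest i c st _
    rw [if_neg (by omega)]
    norm_num
  | succ n ih =>
    intro rest i c st hc
    have hstep : goA fl (List.replicate (n+1) "." ++ rest) i c st =
        if c + 1 = fl then some st
        else goA fl (List.replicate n "." ++ rest) (i + 1) (c + 1) st := by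
      simp only [List.replicate_succ, List.cons_append, goA]
      rw [if_neg (by omega : ¬ c = 0)]
      simp
    rw [hstep]
    by_cases h1 : c + 1 = fl
    · rw [if_pos h1, if_pos (by push_cast; omega)]
    · rw [if_neg h1, ih rest (i + 1) (c + 1) st (by omega)]
      by_cases h2 : c + 1 < fl ∧ fl ≤ c + 1 + (n : Int)
      · rw [if_pos h2, if_pos (by push_cast; omega)]
      · rw [if_neg h2, if_neg (by push_cast; omega)]
        congr 1 <;> push_cast <;> ring

-- the first runLen x xs elements of xs are all x
theorem take_runLen (x : String) : ∀ (xs : List String),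
    List.take (runLen x xs) xs = List.replicate (runLen x xs) x := by
  intro xs
  induction xs with
  | nil => rfl
  | cons y ys ih =>
    by_cases h : y = x
    · rw [show runLen x (y :: ys) = runLen x ys + 1 by simp [runLen, h]]
      rw [List.take_succ_cons, List.replicate_succ, h, ih]
    · rw [show runLen x (y :: ys) = 0 by simp [runLen, h]]
      rfl

-- maximality: after the run, the next element (if any) differs from x
theorem drop_runLen_head (x : String) : ∀ (xs : List String),
    xs.drop (runLen x xs) = [] ∨
      ∃ y ys, xs.drop (runLen x xs) = y :: ys ∧ y ≠ x := by
  intro xs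
  induction xs with
  | nil => left; rfl
  | cons y ys ih =>
    by_cases h : y = x
    · rw [show runLen x (y :: ys) = runLen x ys + 1 by simp [runLen, h], List.drop_succ_cons]
      exact ih
    · right
      refine ⟨y, ys, ?_, h⟩
      rw [show runLen x (y :: ys) = 0 by simp [runLen, h], List.drop_zero]

-- B may jump over a leading run of non-dot blocks without changing the result
theorem goB_skip (fl : Int) (x : String) (hx : x ≠ ".") : ∀ (xs : List String) (i : Int),
    goB fl xs i = goB fl (xs.drop (runLen x xs)) (i + (runLen x xs : Int)) := by
  intro xs i
  cases xs with
  | nil => simp [runLen]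
  | cons y ys =>
    by_cases h : y = x
    · rw [show runLen x (y :: ys) = runLen x ys + 1 by simp [runLen, h]]
      rw [goB]
      rw [if_neg (by intro ⟨h1, _⟩; exact hx (h ▸ h1))]
      rw [show runLen y ys = runLen x ys from h ▸ rfl, List.drop_succ_cons]
      congr 1
      push_cast; ring
    · rw [show runLen x (y :: ys) = 0 by simp [runLen, h]]
      simp

-- main invariant: with consecutive = 0 the two loops agree, by strong induction on the length
theorem main_lemma (fl : Int) : ∀ (n : Nat) (xs : List String), xs.length ≤ n →
    ∀ (i st : Int), goA fl xs i 0 st = goB fl xs i := by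
  intro n
  induction n with
  | zero =>
    intro xs hlen i st
    have : xs = [] := List.eq_nil_of_length_eq_zero (by omega)
    subst this
    rw [goA, goB]
  | succ n ih =>
    intro xs hlen i st
    cases xs with
    | nil => rw [goA, goB]
    | cons x xs' =>
      by_cases hx : x = "."
      · subst hx
        have hstepA : goA fl ("." :: xs') i 0 st =
            if (0:Int) + 1 = fl then some i else goA fl xs' (i + 1) 1 i := by
          simp only [goA]
          simp
        set k := runLen "." xs' with hk
        have hsplit : xs' = List.replicate k "." ++ xs'.drop k := by
          conv_lhs => rw [← List.take_append_drop k xs']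
          rw [hk, take_runLen "." xs']
        rw [hstepA, goB]
        by_cases h1 : (0:Int) + 1 = fl
        · rw [if_pos h1, if_pos ⟨rfl, by omega, by omega⟩]
        · rw [if_neg h1]
          conv_lhs => rw [hsplit]
          rw [goA_dotrun fl k (xs'.drop k) (i + 1) 1 i (by omega)]
          by_cases h2 : 1 < fl ∧ fl ≤ 1 + (k : Int)
          · rw [if_pos h2, if_pos ⟨rfl, by omega, by omega⟩]
          · rw [if_neg h2, if_neg (by intro ⟨_, hb, hc⟩; omega)]
            rcases drop_runLen_head "." xs' with hnil | ⟨y, ys, hcons, hy⟩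
            · rw [← hk] at hnil
              rw [hnil, goA, goB]
            · rw [← hk] at hcons
              rw [hcons]
              rw [show goA fl (y :: ys) (i + 1 + (k:Int)) (1 + (k:Int)) i
                    = goA fl ys (i + 1 + (k:Int) + 1) 0 i by rw [goA, if_neg hy]]
              have hlenys : ys.length ≤ n := by
                have := congrArg List.length hcons
                simp only [List.length_drop, List.length_cons] at this
                simp only [List.length_cons] at hlen
                omega
              rw [ih ys hlenys (i + 1 + (k:Int) + 1) i]
              rw [show goB fl (y :: ys) (i + (k:Int) + 1)
                    = goB fl (ys.drop (runLen y ys)) (i + (k:Int) + 1 + (runLen y ys : Int) + 1) by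
                  rw [goB, if_neg (by intro ⟨h1', _⟩; exact hy h1')]]
              rw [goB_skip fl y hy ys (i + 1 + (k:Int) + 1)]
              congr 1
              ring
      · rw [show goA fl (x :: xs') i 0 st = goA fl xs' (i + 1) 0 st by rw [goA, if_neg hx]]
        have hlen' : xs'.length ≤ n := by simp only [List.length_cons] at hlen; omega
        rw [ih xs' hlen' (i + 1) st]
        rw [show goB fl (x :: xs') i
              = goB fl (xs'.drop (runLen x xs')) (i + (runLen x xs' : Int) + 1) by
            rw [goB, if_neg (by intro ⟨h1, _⟩; exact hx h1)]]
        rw [goB_skip fl x hx xs' (i + 1)]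
        congr 1
        ring

-- ===== VERDICT (by name: the statement is the Claim_ definition above) =====
theorem find_leftmost_free_space_spec : Claim_equal_find_leftmost_free_space := by
  intro disk file_length _
  unfold Spec_find_leftmost_free_space find_leftmost_free_space find_leftmost_free_space_alt
  exact main_lemma file_length disk.length disk (le_refl _) 0 0
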